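-- pv_equiv track=rewrite | github.com/MrBrantCode/unitest_baseline | mut_generate/mist_train_cf/cf_73236/solution.py | replace_mirrored_zero
-- ===== SOURCE A (Python) =====
-- def replace_mirrored_zero(matrix):
--     n = len(matrix)
--     mid = n // 2
--
--     # check only the first half
--     for i in range(mid):
--         for j in range(n):
--             if matrix[i][j] == '0' and matrix[n - 1 - i][n - 1 - j] == '0':
--                 matrix[i][j] = matrix[n - 1 - i][n - 1 - j] = chr(ord('0') + 1)
--             if matrix[j][i] == '0' and matrix[n - 1 - j][n - 1 - i] == '0':
--                 matrix[j][i] = matrix[n - 1 - j][n - 1 - i] = chr(ord('0') + 1)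
--
--     # check central row/col for odd size matrix
--     if n % 2 != 0:
--         for i in range(mid):
--             if matrix[mid][i] == '0' and matrix[mid][n - 1 - i] == '0':
--                 matrix[mid][i] = matrix[mid][n - 1 - i] = chr(ord('0') + 1)
--             if matrix[i][mid] == '0' and matrix[n - 1 - i][mid] == '0':
--                 matrix[i][mid] = matrix[n - 1 - i][mid] = chr(ord('0') + 1)
--
--     return matrix
-- ===== SOURCE B (Python) =====
-- # B: pure pointwise rebuild — each cell of the NEW n x n matrix is '1' exactly when it
-- # and its distinct 180-degree mirror are both '0' in the ORIGINAL matrix; unlike A it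
-- # does not mutate its argument (equivalence is about the return value only).
-- def replace_mirrored_zero(matrix):
--     n = len(matrix)
--     return [
--         [
--             '1'
--             if (i, j) != (n - 1 - i, n - 1 - j)
--             and matrix[i][j] == '0'
--             and matrix[n - 1 - i][n - 1 - j] == '0'
--             else matrix[i][j]
--             for j in range(n)
--         ]
--         for i in range(n)
--     ]
-- ===== Notes on version B (the rewrite author's own statement) =====
-- stated objective: simpler
-- what changed: A's three in-place passes (first-half rows plus their transpose, then a separate central row/column phase for odd n) are replaced by one pure pointwise comprehension building a new n x n matrix, setting a cell to '1' exactly when it and its distinct mirror are both '0' in the original; B does not mutate its argument. Pre_ restricts to square matrices, the function's natural domain: on ragged input A raises on short rows and on over-long rows A's and B's values (A keeps the tail cells, B truncates rows to the matrix height) are both accidents of the implementations.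
-- outside the precondition, e.g. on replace_mirrored_zero([['0', 'x']]): A returns [['0', 'x']], B returns [['0']]; on replace_mirrored_zero([[]]): A returns [[]], B raises IndexError
import Mathlib
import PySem

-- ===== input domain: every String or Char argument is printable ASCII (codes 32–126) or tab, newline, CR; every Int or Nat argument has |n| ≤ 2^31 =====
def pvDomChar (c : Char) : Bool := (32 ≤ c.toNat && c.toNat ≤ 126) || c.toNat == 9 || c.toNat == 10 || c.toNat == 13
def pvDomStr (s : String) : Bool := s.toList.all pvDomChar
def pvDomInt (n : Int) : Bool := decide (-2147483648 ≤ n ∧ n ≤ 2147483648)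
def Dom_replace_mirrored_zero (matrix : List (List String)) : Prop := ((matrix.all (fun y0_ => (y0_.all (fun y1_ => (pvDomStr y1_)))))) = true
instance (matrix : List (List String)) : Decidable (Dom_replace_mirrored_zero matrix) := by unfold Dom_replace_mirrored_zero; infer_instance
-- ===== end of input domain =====

-- B rebuilds the matrix in one pure pointwise pass instead of A's three in-place passes
-- (objective: simpler).  A mutates its argument in place, B does not: the equivalence
-- proved here is about the RETURN value only.

-- ===== PORT A =====
-- matrix[i][j] (indices always in range under Pre_)
def pvCell (m : List (List String)) (i j : Nat) : String := (m.getD i []).getD j ""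
-- matrix[i][j] = v
def pvSet (m : List (List String)) (i j : Nat) (v : String) : List (List String) :=
  m.set i ((m.getD i []).set j v)
-- the repeated statement pattern of A:
-- if matrix[a][b] == '0' and matrix[c][d] == '0': matrix[a][b] = matrix[c][d] = '1'
def pairUpd (m : List (List String)) (a b c d : Nat) : List (List String) :=
  if pvCell m a b = "0" ∧ pvCell m c d = "0" then pvSet (pvSet m a b "1") c d "1" else m

-- loops range(mid)/range(n) over nonnegative bounds ported as List.range
def replace_mirrored_zero (matrix : List (List String)) : List (List String) :=
  let n := matrix.length
  let mid := n / 2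
  let m1 := (List.range mid).foldl (fun m i =>
    (List.range n).foldl (fun m j =>
      pairUpd (pairUpd m i j (n - 1 - i) (n - 1 - j)) j i (n - 1 - j) (n - 1 - i)) m) matrix
  if n % 2 ≠ 0 then
    (List.range mid).foldl (fun m i =>
      pairUpd (pairUpd m mid i mid (n - 1 - i)) i mid (n - 1 - i) mid) m1
  else m1

-- ===== PORT B =====
def replace_mirrored_zero_alt (matrix : List (List String)) : List (List String) :=
  let n := matrix.length
  (List.range n).map (fun i => (List.range n).map (fun j =>
    if ¬((i, j) = (n - 1 - i, n - 1 - j)) ∧ pvCell matrix i j = "0" ∧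
        pvCell matrix (n - 1 - i) (n - 1 - j) = "0" then "1" else pvCell matrix i j))

-- ===== PRECONDITION & SPEC =====
-- Pre_ restricts to square matrices, the function's natural domain: on ragged input A
-- raises IndexError when a row is too short, and when rows are longer than the matrix
-- height A's and B's values (A keeps the tail cells, B truncates rows to the matrix
-- height) are both accidents of the implementations.
def Pre_replace_mirrored_zero (matrix : List (List String)) : Prop :=
  ∀ row ∈ matrix, row.length = matrix.length
instance (matrix : List (List String)) : Decidable (Pre_replace_mirrored_zero matrix) := by
  unfold Pre_replace_mirrored_zero; infer_instance

def pvWitness_replace_mirrored_zero : List (List String) :=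
  [["0", "0", "x"], ["1", "0", "0"], ["0", "x", "0"]]

def Spec_replace_mirrored_zero (matrix : List (List String)) (out : List (List String)) : Prop := out = replace_mirrored_zero_alt matrix
instance (matrix : List (List String)) (out : List (List String)) : Decidable (Spec_replace_mirrored_zero matrix out) := by unfold Spec_replace_mirrored_zero; infer_instance

-- ===== CLAIM (what is proved, stated in full; the proofs are below) =====
def Claim_equal_replace_mirrored_zero : Prop := ∀ (matrix : List (List String)), Dom_replace_mirrored_zero matrix → Pre_replace_mirrored_zero matrix → Spec_replace_mirrored_zero matrix (replace_mirrored_zero matrix)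

-- ===== LEMMAS AND PROOFS =====

-- "both this cell and its 180-degree mirror are '0' in the original matrix"
def pvZ (orig : List (List String)) (i j : Nat) : Prop :=
  pvCell orig i j = "0" ∧ pvCell orig (orig.length - 1 - i) (orig.length - 1 - j) = "0"

-- invariant carried through A's folds: C is the set of cells already paired off;
-- a covered cell whose pair was all-'0' holds "1", every other cell is untouched
def pvInv (orig : List (List String)) (C : Nat → Nat → Prop) (m : List (List String)) : Prop :=
  m.length = orig.length ∧
  (∀ i, i < orig.length → (m.getD i []).length = orig.length) ∧
  (∀ i j, i < orig.length → j < orig.length →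
    ((C i j ∧ pvZ orig i j) → pvCell m i j = "1") ∧
    (¬(C i j ∧ pvZ orig i j) → pvCell m i j = pvCell orig i j))

-- C only covers in-range, non-self-paired cells, and is closed under mirroring
def pvCGood (orig : List (List String)) (C : Nat → Nat → Prop) : Prop :=
  ∀ i j, C i j → i < orig.length ∧ j < orig.length ∧
    ¬(i = orig.length - 1 - i ∧ j = orig.length - 1 - j) ∧
    C (orig.length - 1 - i) (orig.length - 1 - j)

theorem pvCell_set_eq (m : List (List String)) (i j : Nat) (v : String)
    (hi : i < m.length) (hj : j < (m.getD i []).length) :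
    pvCell (pvSet m i j v) i j = v := by
  simp [pvCell, pvSet, List.getD, List.getElem?_set_self hi, List.getElem?_set_self (by simpa using hj)]

theorem pvCell_set_ne (m : List (List String)) (i j x y : Nat) (v : String)
    (h : ¬(x = i ∧ y = j)) : pvCell (pvSet m i j v) x y = pvCell m x y := by
  by_cases hx : x = i
  · subst hx
    have hy : y ≠ j := by tauto
    by_cases hi : x < m.length
    · simp [pvCell, pvSet, List.getD, List.getElem?_set_self hi, List.getElem?_set_ne (Ne.symm hy)]
    · simp [pvCell, pvSet, List.getD, hi]
  · simp [pvCell, pvSet, List.getD, List.getElem?_set_ne (Ne.symm hx)]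

theorem pvSet_length (m : List (List String)) (i j : Nat) (v : String) :
    (pvSet m i j v).length = m.length := by simp [pvSet]

theorem pvSet_row_length (m : List (List String)) (i j x : Nat) (v : String) :
    ((pvSet m i j v).getD x []).length = (m.getD x []).length := by
  by_cases hx : x = i
  · subst hx
    by_cases hi : x < m.length
    · simp [pvSet, List.getD, List.getElem?_set_self hi]
    · simp [pvSet, List.getD, hi]
  · simp [pvSet, List.getD, List.getElem?_set_ne (Ne.symm hx)]

-- one pairUpd step, pairing (a,b) with its mirror
theorem pairUpd_inv (orig : List (List String)) (C : Nat → Nat → Prop)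
    (m : List (List String)) (hI : pvInv orig C m) (hC : pvCGood orig C)
    (a b : Nat) (ha : a < orig.length) (hb : b < orig.length)
    (hne : ¬(a = orig.length - 1 - a ∧ b = orig.length - 1 - b)) :
    pvInv orig (fun i j => C i j ∨ (i = a ∧ j = b) ∨
        (i = orig.length - 1 - a ∧ j = orig.length - 1 - b))
      (pairUpd m a b (orig.length - 1 - a) (orig.length - 1 - b)) ∧
    pvCGood orig (fun i j => C i j ∨ (i = a ∧ j = b) ∨
        (i = orig.length - 1 - a ∧ j = orig.length - 1 - b)) := by
  obtain ⟨hlen, hrow, hcells⟩ := hI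
  set n := orig.length with hn
  have ha' : n - 1 - a < n := by omega
  have hb' : n - 1 - b < n := by omega
  have hma : n - 1 - (n - 1 - a) = a := by omega
  have hmb : n - 1 - (n - 1 - b) = b := by omega
  -- Z is symmetric between the pair
  have hZsym : pvZ orig (n - 1 - a) (n - 1 - b) ↔ pvZ orig a b := by
    unfold pvZ; rw [← hn, hma, hmb]; exact And.comm
  -- C agrees on the pair
  have hCsym : C (n - 1 - a) (n - 1 - b) ↔ C a b := by
    constructor
    · intro h; have := (hC _ _ h).2.2.2; rwa [← hn, hma, hmb] at this
    · intro h; exact (hC _ _ h).2.2.2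
  have hCG : pvCGood orig (fun i j => C i j ∨ (i = a ∧ j = b) ∨
      (i = n - 1 - a ∧ j = n - 1 - b)) := by
    intro i j hij
    rcases hij with h | ⟨rfl, rfl⟩ | ⟨rfl, rfl⟩
    · obtain ⟨h1, h2, h3, h4⟩ := hC _ _ h; exact ⟨h1, h2, h3, Or.inl h4⟩
    · exact ⟨ha, hb, hne, Or.inr (Or.inr ⟨rfl, rfl⟩)⟩
    · refine ⟨ha', hb', ?_, ?_⟩
      · rw [← hn]; omega
      · rw [← hn, hma, hmb]; exact Or.inr (Or.inl ⟨rfl, rfl⟩)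
  refine ⟨?_, hCG⟩
  unfold pairUpd
  split_ifs with hcond
  · -- both cells currently '0' → they were untouched originals, pair gets set
    have hnotCab : ¬(C a b ∧ pvZ orig a b) := by
      intro h; have := (hcells a b ha hb).1 h; rw [this] at hcond
      exact absurd hcond.1 (by decide)
    have hnotCab' : ¬(C (n-1-a) (n-1-b) ∧ pvZ orig (n-1-a) (n-1-b)) := by
      intro h; have := (hcells _ _ ha' hb').1 h; rw [this] at hcond
      exact absurd hcond.2 (by decide)
    have hmab : pvCell m a b = pvCell orig a b := (hcells a b ha hb).2 hnotCab
    have hmab' : pvCell m (n-1-a) (n-1-b) = pvCell orig (n-1-a) (n-1-b) :=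
      (hcells _ _ ha' hb').2 hnotCab'
    have hZ : pvZ orig a b := ⟨by rw [← hmab]; exact hcond.1, by rw [← hmab']; exact hcond.2⟩
    have hZ' : pvZ orig (n-1-a) (n-1-b) := hZsym.mpr hZ
    have hpairne : ¬(a = n - 1 - a ∧ b = n - 1 - b) := hne
    -- lengths of the doubly-set matrix
    have hL1 : (pvSet m a b "1").length = n := by rw [pvSet_length, hlen]
    have hlen2 : (pvSet (pvSet m a b "1") (n-1-a) (n-1-b) "1").length = n := by
      rw [pvSet_length, hL1]
    have hrow2 : ∀ i, i < n → ((pvSet (pvSet m a b "1") (n-1-a) (n-1-b) "1").getD i []).length = n := by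
      intro i hi; rw [pvSet_row_length, pvSet_row_length]; exact hrow i hi
    refine ⟨hlen2, hrow2, ?_⟩
    intro i j hi hj
    constructor
    · rintro ⟨hC', hZ2⟩
      by_cases h1 : i = n - 1 - a ∧ j = n - 1 - b
      · obtain ⟨rfl, rfl⟩ := h1
        exact pvCell_set_eq _ _ _ _ (by rw [hL1]; exact ha') (by rw [pvSet_row_length]; rw [hrow _ ha']; exact hb')
      · rw [pvCell_set_ne _ _ _ _ _ _ h1]
        by_cases h2 : i = a ∧ j = b
        · obtain ⟨rfl, rfl⟩ := h2
          exact pvCell_set_eq _ _ _ _ (by rw [hlen]; exact ha) (by rw [hrow _ ha]; exact hb)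
        · rw [pvCell_set_ne _ _ _ _ _ _ h2]
          rcases hC' with h | h | h
          · exact (hcells i j hi hj).1 ⟨h, hZ2⟩
          · exact absurd h h2
          · exact absurd h h1
    · intro hn2
      have h2 : ¬(i = a ∧ j = b) := by
        rintro ⟨rfl, rfl⟩; exact hn2 ⟨Or.inr (Or.inl ⟨rfl, rfl⟩), hZ⟩
      have h1 : ¬(i = n - 1 - a ∧ j = n - 1 - b) := by
        rintro ⟨rfl, rfl⟩; exact hn2 ⟨Or.inr (Or.inr ⟨rfl, rfl⟩), hZ'⟩
      rw [pvCell_set_ne _ _ _ _ _ _ h1, pvCell_set_ne _ _ _ _ _ _ h2]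
      exact (hcells i j hi hj).2 (fun h => hn2 ⟨Or.inl h.1, h.2⟩)
  · -- condition false → matrix unchanged
    refine ⟨hlen, hrow, ?_⟩
    intro i j hi hj
    constructor
    · rintro ⟨hC', hZ2⟩
      rcases hC' with h | ⟨rfl, rfl⟩ | ⟨rfl, rfl⟩
      · exact (hcells i j hi hj).1 ⟨h, hZ2⟩
      · -- (i,j) = (a,b), Z a b holds; C a b must hold, else cond would be true
        by_cases hCab : C i j
        · exact (hcells i j hi hj).1 ⟨hCab, hZ2⟩
        · exfalso
          have hCab' : ¬ C (n-1-i) (n-1-j) := fun h => hCab (hCsym.mp h)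
          have e1 : pvCell m i j = pvCell orig i j :=
            (hcells i j hi hj).2 (fun h => hCab h.1)
          have e2 : pvCell m (n-1-i) (n-1-j) = pvCell orig (n-1-i) (n-1-j) :=
            (hcells _ _ ha' hb').2 (fun h => hCab' h.1)
          exact hcond ⟨by rw [e1]; exact hZ2.1, by rw [e2]; exact hZ2.2⟩
      · -- (i,j) = (a',b')
        by_cases hCab : C a b
        · exact (hcells _ _ ha' hb').1 ⟨hCsym.mpr hCab, hZ2⟩
        · exfalso
          have hZab : pvZ orig a b := hZsym.mp hZ2
          have e1 : pvCell m a b = pvCell orig a b :=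
            (hcells a b ha hb).2 (fun h => hCab h.1)
          have e2 : pvCell m (n-1-a) (n-1-b) = pvCell orig (n-1-a) (n-1-b) :=
            (hcells _ _ ha' hb').2 (fun h => hCab (hCsym.mp h.1))
          exact hcond ⟨by rw [e1]; exact hZab.1, by rw [e2]; exact hZab.2⟩
    · intro hn2
      exact (hcells i j hi hj).2 (fun h => hn2 ⟨Or.inl h.1, h.2⟩)

theorem pairUpd_inv' (orig : List (List String)) (C : Nat → Nat → Prop)
    (m : List (List String)) (hI : pvInv orig C m) (hC : pvCGood orig C)
    (a b c d : Nat) (ha : a < orig.length) (hb : b < orig.length)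
    (hc : c = orig.length - 1 - a) (hd : d = orig.length - 1 - b)
    (hne : ¬(a = orig.length - 1 - a ∧ b = orig.length - 1 - b)) :
    pvInv orig (fun i j => C i j ∨ (i = a ∧ j = b) ∨
        (i = orig.length - 1 - a ∧ j = orig.length - 1 - b)) (pairUpd m a b c d) ∧
    pvCGood orig (fun i j => C i j ∨ (i = a ∧ j = b) ∨
        (i = orig.length - 1 - a ∧ j = orig.length - 1 - b)) := by
  subst hc hd; exact pairUpd_inv orig C m hI hC a b ha hb hne

-- the inner loop of the first phase, row i
theorem inner_inv (orig : List (List String)) (i : Nat) (hi : i < orig.length / 2) :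
    ∀ (l : List Nat), (∀ j ∈ l, j < orig.length) →
    ∀ (C : Nat → Nat → Prop) (m : List (List String)), pvInv orig C m → pvCGood orig C →
    ∃ C', pvInv orig C'
        (l.foldl (fun m j => pairUpd (pairUpd m i j (orig.length - 1 - i) (orig.length - 1 - j))
            j i (orig.length - 1 - j) (orig.length - 1 - i)) m) ∧
      pvCGood orig C' ∧ (∀ x y, C x y → C' x y) ∧ (∀ j ∈ l, C' i j) := by
  intro l
  induction l with
  | nil => intro _ C m hI hC; exact ⟨C, hI, hC, fun _ _ h => h, by simp⟩
  | cons j t ih =>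
    intro hl C m hI hC
    have hj : j < orig.length := hl j (by simp)
    have hi' : i < orig.length := by omega
    have hnei : ¬(i = orig.length - 1 - i ∧ j = orig.length - 1 - j) := by omega
    have hnej : ¬(j = orig.length - 1 - j ∧ i = orig.length - 1 - i) := by omega
    obtain ⟨hI1, hC1⟩ := pairUpd_inv orig C m hI hC i j hi' hj hnei
    obtain ⟨hI2, hC2⟩ := pairUpd_inv orig _ _ hI1 hC1 j i hj hi' hnej
    obtain ⟨C', hI', hC', hmono, hcov⟩ := ih (fun x hx => hl x (by simp [hx])) _ _ hI2 hC2
    refine ⟨C', hI', hC', ?_, ?_⟩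
    · intro x y h; exact hmono x y (Or.inl (Or.inl h))
    · intro x hx
      rcases List.mem_cons.mp hx with rfl | hx
      · exact hmono i x (Or.inl (Or.inr (Or.inl ⟨rfl, rfl⟩)))
      · exact hcov x hx

-- the first phase: all rows i < mid
theorem outer_inv (orig : List (List String)) :
    ∀ (l : List Nat), (∀ i ∈ l, i < orig.length / 2) →
    ∀ (C : Nat → Nat → Prop) (m : List (List String)), pvInv orig C m → pvCGood orig C →
    ∃ C', pvInv orig C'
        (l.foldl (fun m i => (List.range orig.length).foldl (fun m j =>
          pairUpd (pairUpd m i j (orig.length - 1 - i) (orig.length - 1 - j))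
            j i (orig.length - 1 - j) (orig.length - 1 - i)) m) m) ∧
      pvCGood orig C' ∧ (∀ x y, C x y → C' x y) ∧
      (∀ i ∈ l, ∀ j, j < orig.length → C' i j) := by
  intro l
  induction l with
  | nil => intro _ C m hI hC; exact ⟨C, hI, hC, fun _ _ h => h, by simp⟩
  | cons i t ih =>
    intro hl C m hI hC
    have hi : i < orig.length / 2 := hl i (by simp)
    obtain ⟨C1, hI1, hC1, hmono1, hcov1⟩ :=
      inner_inv orig i hi (List.range orig.length) (by simp) C m hI hC
    obtain ⟨C', hI', hC', hmono, hcov⟩ := ih (fun x hx => hl x (by simp [hx])) _ _ hI1 hC1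
    refine ⟨C', hI', hC', fun x y h => hmono x y (hmono1 x y h), ?_⟩
    intro x hx j hj
    rcases List.mem_cons.mp hx with rfl | hx
    · exact hmono x j (hcov1 j (List.mem_range.mpr hj))
    · exact hcov x hx j hj

-- the central row/column phase for odd n
theorem central_inv (orig : List (List String)) (hodd : orig.length % 2 = 1) :
    ∀ (l : List Nat), (∀ i ∈ l, i < orig.length / 2) →
    ∀ (C : Nat → Nat → Prop) (m : List (List String)), pvInv orig C m → pvCGood orig C →
    ∃ C', pvInv orig C'
        (l.foldl (fun m i =>
          pairUpd (pairUpd m (orig.length / 2) i (orig.length / 2) (orig.length - 1 - i))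
            i (orig.length / 2) (orig.length - 1 - i) (orig.length / 2)) m) ∧
      pvCGood orig C' ∧ (∀ x y, C x y → C' x y) ∧ (∀ i ∈ l, C' (orig.length / 2) i) := by
  intro l
  induction l with
  | nil => intro _ C m hI hC; exact ⟨C, hI, hC, fun _ _ h => h, by simp⟩
  | cons i t ih =>
    intro hl C m hI hC
    have hi : i < orig.length / 2 := hl i (by simp)
    have hmid : orig.length / 2 < orig.length := by omega
    have hi' : i < orig.length := by omega
    have emid : orig.length / 2 = orig.length - 1 - orig.length / 2 := by omega
    obtain ⟨hI1, hC1⟩ := pairUpd_inv' orig C m hI hC (orig.length / 2) i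
      (orig.length / 2) (orig.length - 1 - i) hmid hi' (by omega) rfl (by omega)
    obtain ⟨hI2, hC2⟩ := pairUpd_inv' orig _ _ hI1 hC1 i (orig.length / 2)
      (orig.length - 1 - i) (orig.length / 2) hi' hmid rfl (by omega) (by omega)
    obtain ⟨C', hI', hC', hmono, hcov⟩ := ih (fun x hx => hl x (by simp [hx])) _ _ hI2 hC2
    refine ⟨C', hI', hC', ?_, ?_⟩
    · intro x y h; exact hmono x y (Or.inl (Or.inl h))
    · intro x hx
      rcases List.mem_cons.mp hx with rfl | hx
      · exact hmono _ x (Or.inl (Or.inr (Or.inl ⟨rfl, rfl⟩)))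
      · exact hcov x hx

theorem pv_main (matrix : List (List String))
    (hPre : ∀ row ∈ matrix, row.length = matrix.length) :
    replace_mirrored_zero matrix = replace_mirrored_zero_alt matrix := by
  set n := matrix.length with hn
  -- initial invariant
  have hrow0 : ∀ i, i < n → (matrix.getD i []).length = n := by
    intro i hi
    rw [List.getD_eq_getElem _ _ hi]
    exact hPre _ (List.getElem_mem hi)
  have hI0 : pvInv matrix (fun _ _ => False) matrix :=
    ⟨rfl, hrow0, fun i j hi hj => ⟨fun h => absurd h.1 (by exact id), fun _ => rfl⟩⟩
  have hC0 : pvCGood matrix (fun _ _ => False) := fun i j h => absurd h (by exact id)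
  obtain ⟨C1, hI1, hC1, _, hcov1⟩ :=
    outer_inv matrix (List.range (n / 2)) (fun i hi => by simp at hi; omega) _ matrix hI0 hC0
  -- the final state and its covering set, for both parities
  have key : ∃ C m, replace_mirrored_zero matrix = m ∧ pvInv matrix C m ∧ pvCGood matrix C ∧
      (∀ i ∈ List.range (n / 2), ∀ j, j < n → C i j) ∧
      (n % 2 = 1 → ∀ i, i < n / 2 → C (n / 2) i) := by
    by_cases hodd : n % 2 = 1
    · obtain ⟨C2, hI2, hC2, hmono2, hcov2⟩ :=
        central_inv matrix hodd (List.range (n / 2)) (fun i hi => by simp at hi; omega) C1 _ hI1 hC1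
      refine ⟨C2, _, ?_, hI2, hC2, ?_, ?_⟩
      · show replace_mirrored_zero matrix = _
        unfold replace_mirrored_zero
        rw [← hn]
        simp only [hodd]
        norm_num
      · intro i hi j hj; exact hmono2 _ _ (hcov1 i hi j hj)
      · intro _ i hi; exact hcov2 i (List.mem_range.mpr hi)
    · refine ⟨C1, _, ?_, hI1, hC1, hcov1, fun h => absurd h hodd⟩
      show replace_mirrored_zero matrix = _
      unfold replace_mirrored_zero
      rw [← hn]
      have : n % 2 = 0 := by omega
      simp only [this]
      norm_num
  obtain ⟨C, m, heq, ⟨hlen, hrowl, hcells⟩, hCG, hcovA, hcovC⟩ := key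
  rw [heq]
  -- full coverage of all distinct mirrored pairs
  have hcov : ∀ i j, i < n → j < n → ¬(i = n - 1 - i ∧ j = n - 1 - j) → C i j := by
    intro i j hi hj hne
    by_cases h1 : i < n / 2
    · exact hcovA i (List.mem_range.mpr h1) j hj
    · by_cases h2 : n - 1 - i < n / 2
      · have := hcovA (n - 1 - i) (List.mem_range.mpr h2) (n - 1 - j) (by omega)
        have h4 := (hCG _ _ this).2.2.2
        rw [← hn] at h4
        have e1 : n - 1 - (n - 1 - i) = i := by omega
        have e2 : n - 1 - (n - 1 - j) = j := by omega
        rwa [e1, e2] at h4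
      · have hodd : n % 2 = 1 := by omega
        have hmi : i = n / 2 := by omega
        have hjne : ¬(j = n - 1 - j) := by omega
        subst hmi
        by_cases h3 : j < n / 2
        · exact hcovC hodd j h3
        · have h5 : n - 1 - j < n / 2 := by omega
          have := hcovC hodd (n - 1 - j) h5
          have h4 := (hCG _ _ this).2.2.2
          rw [← hn] at h4
          have e1 : n - 1 - (n / 2) = n / 2 := by omega
          have e2 : n - 1 - (n - 1 - j) = j := by omega
          rwa [e1, e2] at h4
  -- elementwise comparison with the pure rebuild
  have haltlen : (replace_mirrored_zero_alt matrix).length = n := by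
    unfold replace_mirrored_zero_alt; simp [← hn]
  apply List.ext_getElem (by rw [hlen, haltlen])
  intro i hi hi'
  have hiN : i < n := by rwa [hlen] at hi
  have hrowl' : (m.getD i []).length = n := hrowl i hiN
  have hrowlen : m[i].length = n := by rw [(List.getD_eq_getElem m [] hi).symm]; exact hrowl'
  have hB : (replace_mirrored_zero_alt matrix)[i] = (List.range n).map (fun j =>
      if ¬((i, j) = (n - 1 - i, n - 1 - j)) ∧ pvCell matrix i j = "0" ∧
          pvCell matrix (n - 1 - i) (n - 1 - j) = "0" then "1" else pvCell matrix i j) := by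
    unfold replace_mirrored_zero_alt
    simp [← hn]
  rw [hB]
  apply List.ext_getElem (by simp [hrowlen])
  intro j hj hj'
  have hjN : j < n := by rwa [hrowlen] at hj
  rw [List.getElem_map, List.getElem_range]
  have hA : m[i][j] = pvCell m i j := by
    unfold pvCell
    rw [List.getD_eq_getElem m [] hi, List.getD_eq_getElem _ "" hj]
  rw [hA]
  by_cases hself : i = n - 1 - i ∧ j = n - 1 - j
  · -- the self-paired centre cell: untouched on both sides
    have hnC : ¬ C i j := fun h => ((hCG _ _ h).2.2.1) (by rw [← hn]; exact hself)
    rw [(hcells i j hiN hjN).2 (fun h => hnC h.1)]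
    rw [if_neg (fun h => h.1 (by rw [Prod.mk.injEq]; exact ⟨hself.1, hself.2⟩))]
  · have hCij : C i j := hcov i j hiN hjN hself
    by_cases hZ : pvZ matrix i j
    · rw [(hcells i j hiN hjN).1 ⟨hCij, hZ⟩]
      rw [if_pos ⟨fun h => hself (by rw [Prod.mk.injEq] at h; exact h), hZ.1, hZ.2⟩]
    · rw [(hcells i j hiN hjN).2 (fun h => hZ h.2)]
      rw [if_neg (fun h => hZ ⟨h.2.1, h.2.2⟩)]

-- ===== VERDICT (by name: the statement is the Claim_ definition above) =====
theorem replace_mirrored_zero_spec : Claim_equal_replace_mirrored_zero := by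
  intro matrix _ hPre
  exact pv_main matrix hPre
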